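-- pv_equiv track=rewrite | github.com/rowancallahan/speaky | transpiler.py | _process_slice
-- ===== SOURCE A (Python) =====
-- def _process_slice(text):
--     """Process 'slice X from Y to Z' -> 'X[Y:Z]' by word scanning."""
--     words = text.split()
--     result = []
--     i = 0
--     changed = False
--     while i < len(words):
--         if (words[i] == "slice"
--                 and i + 5 <= len(words)
--                 and words[i + 2] == "from"
--                 and words[i + 4] == "to"):
--             var = words[i + 1]
--             start = words[i + 3]
--             end = words[i + 5] if i + 5 < len(words) else ""
--             result.append(var + "[" + start + ":" + end + "]")
--             i += 6
--             changed = True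
--         else:
--             result.append(words[i])
--             i += 1
--
--     return " ".join(result) if changed else text
-- ===== SOURCE B (Python) =====
-- def _process_slice(text):
--     """Process 'slice X from Y to Z' -> 'X[Y:Z]' by recursing on matches."""
--     def go(ws):
--         for j in range(len(ws)):
--             if (ws[j] == "slice" and j + 5 <= len(ws)
--                     and ws[j + 2] == "from" and ws[j + 4] == "to"):
--                 end = ws[j + 5] if j + 5 < len(ws) else ""
--                 tail, _ = go(ws[j + 6:])
--                 return ws[:j] + [ws[j + 1] + "[" + ws[j + 3] + ":" + end + "]"] + tail, True
--         return ws, False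
--     out, changed = go(text.split())
--     return " ".join(out) if changed else text
-- ===== Notes on version B (the rewrite author's own statement) =====
-- stated objective: alternative
-- what changed: A's single while loop walks an index word by word with an append accumulator and a changed flag; B is a recursion on matches: a helper scan finds the first complete keyword pattern, copies the untouched prefix wholesale, rewrites that one occurrence, and recurses on the words after it.
import Mathlib
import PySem

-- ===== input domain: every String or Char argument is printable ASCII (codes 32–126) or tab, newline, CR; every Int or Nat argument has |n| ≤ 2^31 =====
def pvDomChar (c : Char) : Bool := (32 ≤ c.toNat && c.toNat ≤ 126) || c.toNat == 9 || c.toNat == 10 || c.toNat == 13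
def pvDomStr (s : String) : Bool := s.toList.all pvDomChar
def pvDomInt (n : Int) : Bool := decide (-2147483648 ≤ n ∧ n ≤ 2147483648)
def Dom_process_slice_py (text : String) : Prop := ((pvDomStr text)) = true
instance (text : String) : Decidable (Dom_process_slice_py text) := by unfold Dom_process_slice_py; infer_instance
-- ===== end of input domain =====

-- B replaces A's word-by-word while loop (index counter, append accumulator, changed flag)
-- by a recursion on matches: find the first full 'slice … from … to' pattern, rewrite it,
-- and recurse on the remainder; same output, same cost (objective: alternative).

-- ===== PORT A =====
-- A's while loop; every words[k] access is guarded in range by the conditions, so getD is exact.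
-- The locals var/start/end of A are inlined into the appended word. fuel = words.length bounds the
-- iterations (each one advances i by at least 1); the loop stops at i ≥ length exactly as Python's while.
def pvALoop (ws : List String) (fuel : Nat) (i : Nat) (result : List String) (changed : Bool) :
    List String × Bool :=
  match fuel with
  | 0 => (result, changed)
  | fuel + 1 =>
    if i < ws.length then
      if ws.getD i "" = "slice" ∧ i + 5 ≤ ws.length ∧
          ws.getD (i + 2) "" = "from" ∧ ws.getD (i + 4) "" = "to" then
        pvALoop ws fuel (i + 6)
          (result ++ [ws.getD (i + 1) "" ++ "[" ++ ws.getD (i + 3) "" ++ ":" ++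
            (if i + 5 < ws.length then ws.getD (i + 5) "" else "") ++ "]"]) true
      else
        pvALoop ws fuel (i + 1) (result ++ [ws.getD i ""]) changed
    else (result, changed)

def process_slice_py (text : String) : String :=
  if (pvALoop (PySem.Str.split₀ text) (PySem.Str.split₀ text).length 0 [] false).2 then
    PySem.Str.join " " (pvALoop (PySem.Str.split₀ text) (PySem.Str.split₀ text).length 0 [] false).1
  else text

-- ===== PORT B =====
-- Source B's 'for j in range(len(ws)): if <match at j>: return …' is the first j in range(len ws)
-- satisfying the match condition: ported as List.find? over List.range (the early-return for loop).
def pvFindMatch (ws : List String) : Option Nat :=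
  (List.range ws.length).find? (fun j =>
    ws.getD j "" == "slice" && decide (j + 5 ≤ ws.length) &&
    ws.getD (j + 2) "" == "from" && ws.getD (j + 4) "" == "to")

-- needed by pvGoB's termination: a found match index is a real index
theorem pvFindMatch_lt_length (ws : List String) (j : Nat)
    (h : pvFindMatch ws = some j) : j < ws.length := by
  have := List.mem_of_find?_eq_some h
  exact List.mem_range.mp this

-- Source B's go: rewrite the first match and recurse on the words after it; ws[:j] is take j,
-- ws[j+6:] is drop (j+6) (nonnegative indices, so the slices are exact).
def pvGoB (ws : List String) : List String × Bool :=
  match h : pvFindMatch ws with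
  | some j =>
    let e := if j + 5 < ws.length then ws.getD (j + 5) "" else ""
    let p := pvGoB (ws.drop (j + 6))
    (ws.take j ++ [ws.getD (j + 1) "" ++ "[" ++ ws.getD (j + 3) "" ++ ":" ++ e ++ "]"] ++ p.1,
     true)
  | none => (ws, false)
termination_by ws.length
decreasing_by
  have := pvFindMatch_lt_length ws j h
  simp [List.length_drop]; omega

def process_slice_py_alt (text : String) : String :=
  if (pvGoB (PySem.Str.split₀ text)).2 then
    PySem.Str.join " " (pvGoB (PySem.Str.split₀ text)).1
  else text

-- ===== PRECONDITION & SPEC =====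
def Spec_process_slice_py (text : String) (out : String) : Prop := out = process_slice_py_alt text
instance (text : String) (out : String) : Decidable (Spec_process_slice_py text out) := by unfold Spec_process_slice_py; infer_instance

-- ===== CLAIM (what is proved, stated in full; the proofs are below) =====
def Claim_equal_process_slice_py : Prop := ∀ (text : String), Dom_process_slice_py text → Spec_process_slice_py text (process_slice_py text)

-- ===== LEMMAS AND PROOFS =====

theorem pvGoB_eq_none (ws : List String) (h : pvFindMatch ws = none) :
    pvGoB ws = (ws, false) := by
  rw [pvGoB, h]

theorem pvGoB_eq_some (ws : List String) (j : Nat) (h : pvFindMatch ws = some j) :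
    pvGoB ws =
      (ws.take j ++ [ws.getD (j + 1) "" ++ "[" ++ ws.getD (j + 3) "" ++ ":" ++
        (if j + 5 < ws.length then ws.getD (j + 5) "" else "") ++ "]"] ++
        (pvGoB (ws.drop (j + 6))).1, true) := by
  rw [pvGoB, h]

theorem pvFindMatch_zero (ws : List String)
    (hc : ws.getD 0 "" = "slice" ∧ 5 ≤ ws.length ∧
          ws.getD 2 "" = "from" ∧ ws.getD 4 "" = "to") :
    pvFindMatch ws = some 0 := by
  obtain ⟨h0, h5, h2, h4⟩ := hc
  unfold pvFindMatch
  obtain ⟨m, hm⟩ : ∃ m, ws.length = m + 1 := ⟨ws.length - 1, by omega⟩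
  rw [hm, List.range_succ_eq_map, List.find?_cons]
  simp only [List.getD_eq_getElem?_getD] at h0 h2 h4
  simp [h0, h2, h4, hm ▸ h5]

theorem pvFindMatch_cons_shift (w : String) (t : List String)
    (hc : ¬ ((w :: t).getD 0 "" = "slice" ∧ 5 ≤ (w :: t).length ∧
             (w :: t).getD 2 "" = "from" ∧ (w :: t).getD 4 "" = "to")) :
    pvFindMatch (w :: t) = Option.map (· + 1) (pvFindMatch t) := by
  unfold pvFindMatch
  rw [List.length_cons, List.range_succ_eq_map, List.find?_cons]
  have h0 : (((w :: t).getD 0 "" == "slice" && decide (0 + 5 ≤ t.length + 1) &&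
      (w :: t).getD (0 + 2) "" == "from" && (w :: t).getD (0 + 4) "" == "to") : Bool) = false := by
    rw [Bool.eq_false_iff]
    intro htrue
    simp only [Bool.and_eq_true, beq_iff_eq, decide_eq_true_eq] at htrue
    exact hc ⟨htrue.1.1.1, by simp only [List.length_cons]; omega, htrue.1.2, htrue.2⟩
  rw [h0, List.find?_map]
  have hpred : ((fun j => (w :: t).getD j "" == "slice" && decide (j + 5 ≤ t.length + 1) &&
        (w :: t).getD (j + 2) "" == "from" && (w :: t).getD (j + 4) "" == "to") ∘ Nat.succ) =
      (fun j => t.getD j "" == "slice" && decide (j + 5 ≤ t.length) &&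
        t.getD (j + 2) "" == "from" && t.getD (j + 4) "" == "to") := by
    funext j
    simp only [Function.comp_apply, Nat.succ_eq_add_one]
    have a1 : j + 1 + 2 = (j + 2) + 1 := by omega
    have a2 : j + 1 + 4 = (j + 4) + 1 := by omega
    rw [a1, a2, List.getD_cons_succ, List.getD_cons_succ, List.getD_cons_succ]
    have a3 : (decide (j + 1 + 5 ≤ t.length + 1)) = (decide (j + 5 ≤ t.length)) := by
      simp only [decide_eq_decide]; omega
    rw [a3]
  rw [hpred]

theorem drop_cons_getD (ws : List String) (i : Nat) (hi : i < ws.length) :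
    ws.drop i = ws.getD i "" :: ws.drop (i + 1) := by
  rw [List.getD_eq_getElem ws "" hi]
  exact (List.getElem_cons_drop hi).symm

theorem getD_drop (ws : List String) (i j : Nat) :
    (ws.drop i).getD j "" = ws.getD (i + j) "" := by
  simp [List.getD_eq_getElem?_getD, List.getElem?_drop]

-- shape of the A-side condition transported to the dropped suffix
theorem cond_drop_iff (ws : List String) (i : Nat) :
    ((ws.drop i).getD 0 "" = "slice" ∧ 5 ≤ (ws.drop i).length ∧
     (ws.drop i).getD 2 "" = "from" ∧ (ws.drop i).getD 4 "" = "to") ↔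
    (ws.getD i "" = "slice" ∧ i + 5 ≤ ws.length ∧
     ws.getD (i + 2) "" = "from" ∧ ws.getD (i + 4) "" = "to") := by
  rw [getD_drop, getD_drop, getD_drop, List.length_drop]
  constructor
  · rintro ⟨h0, h5, h2, h4⟩; exact ⟨h0, by omega, h2, h4⟩
  · rintro ⟨h0, h5, h2, h4⟩; exact ⟨h0, by omega, h2, h4⟩

-- if the first word of the suffix does not open a match, pvGoB just conses it on
theorem pvGoB_skip (w : String) (t : List String)
    (hc : ¬ ((w :: t).getD 0 "" = "slice" ∧ 5 ≤ (w :: t).length ∧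
             (w :: t).getD 2 "" = "from" ∧ (w :: t).getD 4 "" = "to")) :
    pvGoB (w :: t) = (w :: (pvGoB t).1, (pvGoB t).2) := by
  have hshift := pvFindMatch_cons_shift w t hc
  cases ht : pvFindMatch t with
  | none =>
    rw [pvGoB_eq_none (w :: t) (by rw [hshift, ht]; rfl), pvGoB_eq_none t ht]
  | some j =>
    rw [pvGoB_eq_some (w :: t) (j + 1) (by rw [hshift, ht]; rfl), pvGoB_eq_some t j ht]
    simp only [List.take_succ_cons, List.drop_succ_cons, List.length_cons]
    have e1 : (w :: t).getD (j + 1 + 1) "" = t.getD (j + 1) "" := List.getD_cons_succ ..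
    have e2 : (w :: t).getD (j + 1 + 3) "" = t.getD (j + 3) "" := by
      show (w :: t).getD ((j + 3) + 1) "" = _; exact List.getD_cons_succ ..
    have e3 : (w :: t).getD (j + 1 + 5) "" = t.getD (j + 5) "" := by
      show (w :: t).getD ((j + 5) + 1) "" = _; exact List.getD_cons_succ ..
    rw [e1, e2, e3]
    simp only [show (j + 1 + 5 < t.length + 1) ↔ (j + 5 < t.length) from by omega]
    simp

-- the core invariant: A's loop from index i produces result ++ B's recursion on the suffix
theorem pvLoop_eq_go (ws : List String) :
    ∀ fuel i result changed, ws.length - i ≤ fuel →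
      pvALoop ws fuel i result changed =
        (result ++ (pvGoB (ws.drop i)).1, changed || (pvGoB (ws.drop i)).2) := by
  intro fuel
  induction fuel with
  | zero =>
    intro i result changed hf
    have hi : ¬ i < ws.length := by omega
    rw [pvALoop, List.drop_eq_nil_of_le (by omega : ws.length ≤ i),
        pvGoB_eq_none [] (by rfl)]
    simp
  | succ f ih =>
    intro i result changed hf
    by_cases hi : i < ws.length
    · by_cases hc : ws.getD i "" = "slice" ∧ i + 5 ≤ ws.length ∧
          ws.getD (i + 2) "" = "from" ∧ ws.getD (i + 4) "" = "to"
      · -- a match at i: pvGoB on the suffix fires its match branch at relative index 0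
        have hcd := (cond_drop_iff ws i).mpr hc
        have hfind : pvFindMatch (ws.drop i) = some 0 := pvFindMatch_zero _ hcd
        rw [pvALoop, if_pos hi, if_pos hc, ih (i + 6) _ true (by omega),
            pvGoB_eq_some (ws.drop i) 0 hfind]
        simp only [List.take_zero, List.nil_append, List.drop_drop, getD_drop,
          List.length_drop,
          show (0 + 5 < ws.length - i) ↔ (i + 5 < ws.length) from by omega,
          show i + (0 + 1) = i + 1 from by omega,
          show i + (0 + 3) = i + 3 from by omega,
          show i + (0 + 5) = i + 5 from by omega]
        simp
      · -- no match at i: A copies the word; pvGoB skips it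
        have hcd : ¬ ((ws.drop i).getD 0 "" = "slice" ∧ 5 ≤ (ws.drop i).length ∧
            (ws.drop i).getD 2 "" = "from" ∧ (ws.drop i).getD 4 "" = "to") :=
          fun hh => hc ((cond_drop_iff ws i).mp hh)
        have hdc := drop_cons_getD ws i hi
        rw [pvALoop, if_pos hi, if_neg hc, ih (i + 1) _ changed (by omega), hdc,
            pvGoB_skip (ws.getD i "") (ws.drop (i + 1)) (by rw [← hdc]; exact hcd)]
        simp
    · rw [pvALoop, if_neg hi, List.drop_eq_nil_of_le (by omega : ws.length ≤ i),
          pvGoB_eq_none [] (by rfl)]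
      simp

-- ===== VERDICT (by name: the statement is the Claim_ definition above) =====
theorem process_slice_py_spec : Claim_equal_process_slice_py := by
  intro text _
  unfold Spec_process_slice_py process_slice_py process_slice_py_alt
  rw [pvLoop_eq_go (PySem.Str.split₀ text) (PySem.Str.split₀ text).length 0 [] false (by omega)]
  simp
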